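-- pv_equiv track=rewrite | github.com/matheusflavio/Cloud-Computing-T2 | REST-api-client/client.py | detect_title_column
-- ===== SOURCE A (Python) =====
-- from typing import List, Optional
--
-- def detect_title_column(df_columns: List[str]) -> Optional[str]:
--     """Detecta automaticamente qual coluna do CSV provavelmente contém o título da música."""
--     candidates = [
--         "track_name",
--         "track",
--         "name",
--         "title",
--         "song",
--         "song_name",
--     ]
--     cols_lower = {c.lower(): c for c in df_columns}
--     for cand in candidates:
--         if cand in cols_lower:
--             return cols_lower[cand]
--     return None
-- ===== SOURCE B (Python) =====
-- from typing import List, Optional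
--
-- def detect_title_column(df_columns: List[str]) -> Optional[str]:
--     """Detecta automaticamente qual coluna do CSV provavelmente contém o título da música."""
--     candidates = [
--         "track_name",
--         "track",
--         "name",
--         "title",
--         "song",
--         "song_name",
--     ]
--     rank = {c: i for i, c in enumerate(candidates)}
--     best = None  # (rank, column); lower rank = higher priority, ties -> later column
--     for col in df_columns:
--         r = rank.get(col.lower())
--         if r is not None and (best is None or r <= best[0]):
--             best = (r, col)
--     return best[1] if best is not None else None
-- ===== Notes on version B (the rewrite author's own statement) =====
-- stated objective: alternative
-- what changed: Replaces A's lowercase->column dict plus candidate-priority loop with a single pass over df_columns that keeps the (rank, column) pair of smallest candidate rank, ties going to the later column; the loop over the columns becomes the only loop over the input.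
import Mathlib
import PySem

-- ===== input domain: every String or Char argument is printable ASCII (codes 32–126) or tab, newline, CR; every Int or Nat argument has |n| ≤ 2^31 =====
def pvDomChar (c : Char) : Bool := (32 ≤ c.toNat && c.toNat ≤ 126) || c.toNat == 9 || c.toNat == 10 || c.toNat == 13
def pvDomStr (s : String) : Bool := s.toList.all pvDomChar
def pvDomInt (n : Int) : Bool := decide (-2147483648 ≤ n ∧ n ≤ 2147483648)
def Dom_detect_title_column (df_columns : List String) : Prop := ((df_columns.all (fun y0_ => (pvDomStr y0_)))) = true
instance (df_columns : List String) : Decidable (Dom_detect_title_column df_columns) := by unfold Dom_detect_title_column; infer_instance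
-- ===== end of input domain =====

-- B replaces A's lowercase-dict + candidate loop by a single pass over df_columns keeping the best-ranked match (alternative decomposition, same results).


-- ===== PORT A =====
-- A: build a lowercase->original dict once, then try candidates in order
def pvCandidates : List String :=
  ["track_name", "track", "name", "title", "song", "song_name"]

def pvFindA (cols_lower : PySem.Dict String String) : List String → Option String
  | [] => none
  | cand :: rest =>
      if cols_lower.contains cand then cols_lower.get? cand else pvFindA cols_lower rest

def detect_title_column (df_columns : List String) : Option String :=
  pvFindA (df_columns.foldl (fun d c => d.insert (PySem.Str.lower c) c) PySem.Dict.empty)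
    pvCandidates

-- ===== PORT B =====
-- B: rank = {candidate: priority}; one pass over the columns keeping the pair
-- (rank, column) with the smallest rank, ties resolved to the later column
def pvRank : PySem.Dict String Int :=
  (PySem.List.enumerate pvCandidates).foldl (fun d p => d.insert p.2 p.1) PySem.Dict.empty

def pvStep (best : Option (Int × String)) (col : String) : Option (Int × String) :=
  match pvRank.get? (PySem.Str.lower col) with
  | none => best
  | some r =>
      match best with
      | none => some (r, col)
      | some (r0, _) => if r ≤ r0 then some (r, col) else best

def detect_title_column_alt (df_columns : List String) : Option String :=
  match df_columns.foldl pvStep none with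
  | some (_, col) => some col
  | none => none

-- ===== PRECONDITION & SPEC =====
def Spec_detect_title_column (df_columns : List String) (out : Option String) : Prop := out = detect_title_column_alt df_columns
instance (df_columns : List String) (out : Option String) : Decidable (Spec_detect_title_column df_columns out) := by unfold Spec_detect_title_column; infer_instance

-- ===== CLAIM =====
def Claim_equal_detect_title_column : Prop := ∀ (df_columns : List String), Dom_detect_title_column df_columns → Spec_detect_title_column df_columns (detect_title_column df_columns)

-- ===== LEMMAS AND PROOFS =====

-- last column in cols whose lowercase equals cand (what A's dict stores at cand)
def pvLastMatch (cols : List String) (cand : String) : Option String :=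
  cols.foldl (fun acc col => if PySem.Str.lower col == cand then some col else acc) none

-- first index ≥ i at which s occurs in the list
def pvIdxFrom : List String → String → Int → Option Int
  | [], _, _ => none
  | c :: rest, s, i => if c == s then some i else pvIdxFrom rest s (i + 1)

-- A's scan over the candidates, instrumented with the candidate's rank
def pvGAux (cols : List String) : List String → Int → Option (Int × String)
  | [], _ => none
  | cand :: rest, i =>
      match pvLastMatch cols cand with
      | some col => some (i, col)
      | none => pvGAux cols rest (i + 1)

theorem get?_foldl_insert_eq_lastMatch (l : List String) (d : PySem.Dict String String)
    (cand : String) :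
    (l.foldl (fun d c => d.insert (PySem.Str.lower c) c) d).get? cand =
      l.foldl (fun acc col => if PySem.Str.lower col == cand then some col else acc)
        (d.get? cand) := by
  induction l generalizing d with
  | nil => rfl
  | cons c rest ih =>
      simp only [List.foldl_cons, ih]
      congr 1
      rw [PySem.Dict.get?_insert]
      by_cases h : PySem.Str.lower c = cand
      · simp [h]
      · simp [h, Ne.symm h]

theorem lastMatch_eq_get? (cols : List String) (cand : String) :
    pvLastMatch cols cand =
      (cols.foldl (fun d c => d.insert (PySem.Str.lower c) c) PySem.Dict.empty).get? cand := by
  rw [get?_foldl_insert_eq_lastMatch]; rfl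

theorem rank_get?_eq_idxFrom (s : String) :
    pvRank.get? s = pvIdxFrom pvCandidates s 0 := by
  have h : pvRank = PySem.Dict.mk
      [("track_name", 0), ("track", 1), ("name", 2), ("title", 3), ("song", 4),
       ("song_name", 5)] := by decide
  rw [h]
  simp only [PySem.Dict.get?_mk_cons, pvIdxFrom, pvCandidates]
  norm_num
  rfl

theorem idxFrom_le (l : List String) (s : String) (i j : Int)
    (h : pvIdxFrom l s i = some j) : i ≤ j := by
  induction l generalizing i with
  | nil => simp [pvIdxFrom] at h
  | cons c rest ih =>
      simp only [pvIdxFrom] at h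
      split at h
      · injection h with h; omega
      · have := ih (i + 1) h; omega

theorem gAux_le (cols : List String) (cands : List String) (i : Int) (r : Int) (col : String)
    (h : pvGAux cols cands i = some (r, col)) : i ≤ r := by
  induction cands generalizing i with
  | nil => simp [pvGAux] at h
  | cons cand rest ih =>
      simp only [pvGAux] at h
      split at h
      · cases h; simp_all
      · have := ih (i + 1) h; omega

theorem lastMatch_append (cols : List String) (c cand : String) :
    pvLastMatch (cols ++ [c]) cand =
      if PySem.Str.lower c == cand then some c else pvLastMatch cols cand := by
  simp [pvLastMatch, List.foldl_append]

theorem gAux_append (cols : List String) (c : String) (cands : List String) (i : Int) :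
    pvGAux (cols ++ [c]) cands i =
      match pvIdxFrom cands (PySem.Str.lower c) i with
      | none => pvGAux cols cands i
      | some j =>
          match pvGAux cols cands i with
          | none => some (j, c)
          | some (r0, col0) => if j ≤ r0 then some (j, c) else some (r0, col0) := by
  induction cands generalizing i with
  | nil => rfl
  | cons cand rest ih =>
      by_cases hc : cand = PySem.Str.lower c
      · -- head candidate is hit by the new column
        subst hc
        simp only [pvGAux, pvIdxFrom, lastMatch_append, beq_self_eq_true, if_true]
        rcases hm : pvLastMatch cols (PySem.Str.lower c) with _ | col0
        · simp only [hm]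
          rcases hg : pvGAux cols rest (i + 1) with _ | ⟨r0, col0⟩
          · simp [hg]
          · have := gAux_le cols rest (i + 1) r0 col0 hg
            simp [hg, show i ≤ r0 by omega]
        · simp [hm]
      · simp only [pvGAux, pvIdxFrom, lastMatch_append,
          show (PySem.Str.lower c == cand) = false by simp [Ne.symm hc],
          show (cand == PySem.Str.lower c) = false by simp [hc],
          Bool.false_eq_true, if_false]
        rcases hm : pvLastMatch cols cand with _ | col0
        · exact ih (i + 1)
        · rcases hi : pvIdxFrom rest (PySem.Str.lower c) (i + 1) with _ | j
          · rfl
          · have := idxFrom_le rest (PySem.Str.lower c) (i + 1) j hi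
            simp [show ¬ (j ≤ i) by omega]

theorem foldl_step_eq_gAux (cols : List String) :
    cols.foldl pvStep none = pvGAux cols pvCandidates 0 := by
  induction cols using List.reverseRecOn with
  | nil => rfl
  | append_singleton cols c ih =>
      rw [List.foldl_append, List.foldl_cons, List.foldl_nil, ih, gAux_append]
      rcases h1 : pvIdxFrom pvCandidates (PySem.Str.lower c) 0 with _ | j <;>
        rcases h2 : pvGAux cols pvCandidates 0 with _ | ⟨r0, col0⟩ <;>
          simp only [pvStep, rank_get?_eq_idxFrom, h1, h2]

theorem findA_eq_gAux (cols : List String) (cands : List String) (i : Int) :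
    pvFindA (cols.foldl (fun d c => d.insert (PySem.Str.lower c) c) PySem.Dict.empty) cands
      = (pvGAux cols cands i).map (·.2) := by
  induction cands generalizing i with
  | nil => rfl
  | cons cand rest ih =>
      simp only [pvFindA, pvGAux, ← lastMatch_eq_get?]
      rcases hm : pvLastMatch cols cand with _ | col
      · have : (cols.foldl (fun d c => d.insert (PySem.Str.lower c) c)
            PySem.Dict.empty).contains cand = false := by
          rw [PySem.Dict.contains_eq_isSome_get?, ← lastMatch_eq_get?, hm]; rfl
        simp only [this, Bool.false_eq_true, if_false]
        exact ih (i + 1)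
      · have : (cols.foldl (fun d c => d.insert (PySem.Str.lower c) c)
            PySem.Dict.empty).contains cand = true := by
          rw [PySem.Dict.contains_eq_isSome_get?, ← lastMatch_eq_get?, hm]; rfl
        simp [this, ← lastMatch_eq_get?, hm]

-- ===== VERDICT =====
theorem detect_title_column_spec : Claim_equal_detect_title_column := by
  intro cols _
  show detect_title_column cols = detect_title_column_alt cols
  rw [detect_title_column, detect_title_column_alt, foldl_step_eq_gAux,
    findA_eq_gAux cols pvCandidates 0]
  rcases pvGAux cols pvCandidates 0 with _ | ⟨r, col⟩ <;> rfl
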